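-- pv_equiv track=rewrite | github.com/asd150/MachineLearning | JunctionTree.py | maximalClique
-- ===== SOURCE A (Python) =====
-- def maximalClique(eliminationClique):
--     maximalClique = {}
--     num = 1
--     for k,eC in eliminationClique.items():
--         isContained = False
--         for k2,fC in eliminationClique.items():
--             if set(eC).issubset(set(fC)) and len(eC) < len(fC):
--                 isContained = True
--         if not isContained:
--             maximalClique[num] = eliminationClique[k]
--             num+=1
--     return maximalClique
-- ===== SOURCE B (Python) =====
-- def maximalClique(eliminationClique):
--     # Sort the cliques by decreasing list length, then do ONE greedy pass:
--     # a clique is kept iff it is not strictly contained (longer list, set superset)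
--     # in an ALREADY-KEPT clique -- by transitivity of subset, testing only against
--     # the kept (maximal) cliques is enough, since every strict superset is itself
--     # contained in some kept one of maximal length.  Output preserves original order.
--     items = list(eliminationClique.items())
--     order = sorted(enumerate(items), key=lambda p: len(p[1][1]), reverse=True)
--     kept = []      # (list length, element set) of kept cliques so far
--     keptIdx = set()
--     for i, (k, eC) in order:
--         s, n = set(eC), len(eC)
--         if not any(n < L and s <= S for L, S in kept):
--             kept.append((n, s))
--             keptIdx.add(i)
--     result = {}
--     num = 1
--     for i, (k, eC) in enumerate(items):
--         if i in keptIdx: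
--             result[num] = eC
--             num += 1
--     return result
-- ===== Notes on version B (the rewrite author's own statement) =====
-- stated objective: faster
-- what changed: B replaces A's all-pairs rescan by a sort-then-greedy pass: it sorts the cliques by decreasing list length and keeps a clique iff it is not strictly contained in an already-KEPT clique (correct because every strict superset is itself contained in a kept clique of maximal length), then emits survivors in original order.
import Mathlib
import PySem

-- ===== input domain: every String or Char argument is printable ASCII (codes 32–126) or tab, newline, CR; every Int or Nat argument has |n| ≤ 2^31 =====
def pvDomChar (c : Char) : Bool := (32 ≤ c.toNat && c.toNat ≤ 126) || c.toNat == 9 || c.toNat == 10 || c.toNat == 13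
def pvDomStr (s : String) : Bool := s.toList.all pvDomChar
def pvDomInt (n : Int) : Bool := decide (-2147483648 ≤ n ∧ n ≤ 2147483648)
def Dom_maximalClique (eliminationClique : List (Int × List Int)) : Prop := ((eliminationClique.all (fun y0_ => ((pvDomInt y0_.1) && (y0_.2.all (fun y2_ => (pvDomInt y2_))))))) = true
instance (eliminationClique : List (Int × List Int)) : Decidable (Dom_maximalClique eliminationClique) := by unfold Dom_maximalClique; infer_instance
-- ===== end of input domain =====

-- B sorts the cliques once by decreasing list length and keeps each clique in one greedy pass iff
-- it is not strictly contained in an already-kept clique, instead of A's all-pairs rescan.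

-- ===== PORT A =====
-- port of A: for every clique, a full inner scan over eliminationClique.items(); a survivor
-- is looked up again as eliminationClique[k] (first match = the only match under Pre_)
def maximalClique (eliminationClique : List (Int × List Int)) : List (Int × List Int) :=
  (eliminationClique.foldl
    (fun (st : List (Int × List Int) × Int) kv =>
      let isContained :=
        eliminationClique.foldl
          (fun b kv2 =>
            if PySem.Set.issubset (PySem.Set.ofList kv.2) (PySem.Set.ofList kv2.2)
                && decide (kv.2.length < kv2.2.length) then true else b)
          false
      if isContained = false then
        (st.1 ++ [(st.2, (PySem.Dict.mk eliminationClique).getD kv.1 [])], st.2 + 1)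
      else st)
    ([], 1)).1

-- ===== PORT B =====
-- order = sorted(enumerate(items), key=lambda p: len(p[1][1]), reverse=True); a greedy pass over
-- order accumulating the kept (length, set) pairs and the set of kept original positions; then
-- the output pass over enumerate(items) in original order, re-keying from 1
def maximalClique_alt (eliminationClique : List (Int × List Int)) : List (Int × List Int) :=
  let items := eliminationClique
  let order := PySem.List.sorted (PySem.List.enumerate items) (fun p => p.2.2.length) true
  let st :=
    order.foldl
      (fun (st : List (Nat × PySem.Set Int) × PySem.Set Int) p =>
        let s := PySem.Set.ofList p.2.2
        let n := p.2.2.length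
        if st.1.any (fun q => decide (n < q.1) && PySem.Set.issubset s q.2) then st
        else (st.1 ++ [(n, s)], PySem.Set.add st.2 p.1))
      ([], PySem.Set.empty)
  ((PySem.List.enumerate items).foldl
      (fun (r : List (Int × List Int) × Int) p =>
        if PySem.Set.contains st.2 p.1 then (r.1 ++ [(r.2, p.2.2)], r.2 + 1) else r)
      ([], 1)).1

-- ===== PRECONDITION & SPEC =====
-- Pre_: the argument is a Python dict, so its keys are distinct; an association list with a
-- duplicated key does not arise from any Python input of A.
def Pre_maximalClique (eliminationClique : List (Int × List Int)) : Prop :=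
  (eliminationClique.map Prod.fst).Nodup
instance (eliminationClique : List (Int × List Int)) : Decidable (Pre_maximalClique eliminationClique) := by unfold Pre_maximalClique; infer_instance

def pvWitness_maximalClique : (List (Int × List Int)) := [(0, [1, 2]), (5, [2, 3]), (7, [2])]

def Spec_maximalClique (eliminationClique : List (Int × List Int)) (out : List (Int × List Int)) : Prop := out = maximalClique_alt eliminationClique
instance (eliminationClique : List (Int × List Int)) (out : List (Int × List Int)) : Decidable (Spec_maximalClique eliminationClique out) := by unfold Spec_maximalClique; infer_instance

-- ===== CLAIM (what is proved, stated in full; the proofs are below) =====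
def Claim_equal_maximalClique : Prop := ∀ (eliminationClique : List (Int × List Int)), Dom_maximalClique eliminationClique → Pre_maximalClique eliminationClique → Spec_maximalClique eliminationClique (maximalClique eliminationClique)

-- ===== LEMMAS AND PROOFS =====

def pvSup (ec : List (Int × List Int)) (l : List Int) : Bool :=
  ec.any (fun kv2 => PySem.Set.issubset (PySem.Set.ofList l) (PySem.Set.ofList kv2.2)
            && decide (l.length < kv2.2.length))

-- exists member with maximal f-value
theorem pv_exists_max {α : Type} (f : α → Nat) (l : List α) (h : l ≠ []) :
    ∃ x ∈ l, ∀ y ∈ l, f y ≤ f x := by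
  induction l with
  | nil => simp at h
  | cons a t ih =>
      cases t with
      | nil => exact ⟨a, by simp⟩
      | cons b t' =>
          obtain ⟨x, hx, hmax⟩ := ih (by simp)
          by_cases hc : f x ≤ f a
          · exact ⟨a, by simp, by intro y hy; rcases List.mem_cons.1 hy with rfl | hy
                                  · exact le_refl _
                                  · exact le_trans (hmax y hy) hc⟩
          · exact ⟨x, List.mem_cons_of_mem _ hx, by
              intro y hy; rcases List.mem_cons.1 hy with rfl | hy
              · omega
              · exact hmax y hy⟩

theorem pv_test_eq (ec : List (Int × List Int)) (pre rest : List (Int × (Int × List Int)))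
    (p : Int × (Int × List Int))
    (h : pre ++ p :: rest = PySem.List.sorted (PySem.List.enumerate ec) (fun q => q.2.2.length) true) :
    ((pre.filter (fun q => !pvSup ec q.2.2)).map
        (fun q => (q.2.2.length, PySem.Set.ofList q.2.2))).any
      (fun q => decide (p.2.2.length < q.1) && PySem.Set.issubset (PySem.Set.ofList p.2.2) q.2)
    = pvSup ec p.2.2 := by
  have hperm : (PySem.List.sorted (PySem.List.enumerate ec) (fun q => q.2.2.length) true).Perm
      (PySem.List.enumerate ec) := PySem.List.sorted_perm ..
  have hmemord : ∀ q ∈ pre ++ p :: rest, q ∈ PySem.List.enumerate ec := by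
    intro q hq; rw [h] at hq; exact hperm.mem_iff.1 hq
  have hsnd : ∀ q : Int × (Int × List Int), q ∈ PySem.List.enumerate ec → q.2 ∈ ec := by
    intro q hq
    have : q.2 ∈ (PySem.List.enumerate ec).map (·.2) := List.mem_map_of_mem hq
    rwa [PySem.List.map_snd_enumerate] at this
  rw [Bool.eq_iff_iff]
  simp only [List.any_eq_true, List.mem_map, List.mem_filter, Bool.and_eq_true,
    decide_eq_true_eq, pvSup, Bool.not_eq_eq_eq_not, Bool.not_true]
  constructor
  · rintro ⟨q, ⟨p2, ⟨hp2pre, _⟩, rfl⟩, hlen, hsub⟩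
    exact ⟨p2.2, hsnd p2 (hmemord p2 (List.mem_append_left _ hp2pre)), hsub, hlen⟩
  · rintro ⟨kv2, hkv2, hsub, hlen⟩
    -- choose a strict superset of maximal list length
    obtain ⟨kvm, hkvm, hmax⟩ := pv_exists_max (fun kv => kv.2.length)
      (ec.filter (fun kv => PySem.Set.issubset (PySem.Set.ofList p.2.2) (PySem.Set.ofList kv.2)
          && decide (p.2.2.length < kv.2.length)))
      (by intro hnil
          have : kv2 ∈ ec.filter (fun kv => PySem.Set.issubset (PySem.Set.ofList p.2.2) (PySem.Set.ofList kv.2)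
              && decide (p.2.2.length < kv.2.length)) := by
            rw [List.mem_filter]; exact ⟨hkv2, by simp [hsub, hlen]⟩
          rw [hnil] at this; simp at this)
    rw [List.mem_filter, Bool.and_eq_true, decide_eq_true_eq] at hkvm
    have hkvmec := hkvm.1
    have hkvmsub := hkvm.2.1
    have hkvmlen := hkvm.2.2
    -- kvm is A-maximal
    have hkvmmax : pvSup ec kvm.2 = false := by
      rw [pvSup, List.any_eq_false]
      intro kv3 hkv3
      rw [Bool.and_eq_true, decide_eq_true_eq, not_and]
      intro hsub3 hlen3
      have hkv3w : kv3 ∈ ec.filter (fun kv => PySem.Set.issubset (PySem.Set.ofList p.2.2) (PySem.Set.ofList kv.2)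
          && decide (p.2.2.length < kv.2.length)) := by
        rw [List.mem_filter]
        refine ⟨hkv3, ?_⟩
        rw [Bool.and_eq_true, decide_eq_true_eq]
        constructor
        · rw [PySem.Set.issubset_iff] at hsub3 hkvmsub ⊢
          intro x hx
          exact hsub3 x (hkvmsub x hx)
        · omega
      have := hmax kv3 hkv3w
      omega
    -- kvm has an index and sits in pre
    have : kvm ∈ (PySem.List.enumerate ec).map (·.2) := by rw [PySem.List.map_snd_enumerate]; exact hkvmec
    obtain ⟨q, hqenum, hq2⟩ := List.mem_map.1 this
    have hqord : q ∈ pre ++ p :: rest := by rw [h]; exact (PySem.List.mem_sorted ..).2 hqenum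
    have hpair : (pre ++ p :: rest).Pairwise (fun a b : Int × (Int × List Int) => b.2.2.length ≤ a.2.2.length) := by
      rw [h]; exact PySem.List.sorted_pairwise_rev ..
    have hqpre : q ∈ pre := by
      rcases List.mem_append.1 hqord with hq | hq
      · exact hq
      · rcases List.mem_cons.1 hq with rfl | hq
        · rw [← hq2] at hkvmlen; omega
        · have := ((List.pairwise_append.1 hpair).2.1)
          have hle := (List.pairwise_cons.1 this).1 q hq
          rw [hq2] at hle
          omega
    refine ⟨(q.2.2.length, PySem.Set.ofList q.2.2), ⟨q, ⟨hqpre, ?_⟩, rfl⟩, ?_, ?_⟩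
    · rw [hq2]; exact hkvmmax
    · rw [hq2]; simpa using hkvmlen
    · rw [hq2]; exact hkvmsub

def pvState (ec : List (Int × List Int)) (pre : List (Int × (Int × List Int))) :
    List (Nat × PySem.Set Int) × PySem.Set Int :=
  ((pre.filter (fun p => !pvSup ec p.2.2)).map (fun p => (p.2.2.length, PySem.Set.ofList p.2.2)),
   PySem.Set.ofList ((pre.filter (fun p => !pvSup ec p.2.2)).map (·.1)))

def pvStep (st : List (Nat × PySem.Set Int) × PySem.Set Int)
    (p : Int × (Int × List Int)) : List (Nat × PySem.Set Int) × PySem.Set Int :=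
  if st.1.any (fun q => decide (p.2.2.length < q.1) && PySem.Set.issubset (PySem.Set.ofList p.2.2) q.2)
  then st else (st.1 ++ [(p.2.2.length, PySem.Set.ofList p.2.2)], PySem.Set.add st.2 p.1)

theorem pv_loop_inv (ec : List (Int × List Int)) :
    ∀ (rest pre : List (Int × (Int × List Int))),
      pre ++ rest = PySem.List.sorted (PySem.List.enumerate ec) (fun p => p.2.2.length) true →
      rest.foldl pvStep (pvState ec pre) = pvState ec (pre ++ rest) := by
  intro rest
  induction rest with
  | nil => intro pre h; simp
  | cons p rest' ih =>
      intro pre h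
      rw [List.foldl_cons]
      have hstep : pvStep (pvState ec pre) p = pvState ec (pre ++ [p]) := by
        rw [pvStep]
        simp only [pvState]
        rw [pv_test_eq ec pre rest' p h]
        cases hc : pvSup ec p.2.2
        · simp [hc, List.filter_append, PySem.Set.ofList_append_singleton]
        · simp [hc, List.filter_append]
      rw [hstep]
      have h2 : (pre ++ [p]) ++ rest' = PySem.List.sorted (PySem.List.enumerate ec) (fun p => p.2.2.length) true := by
        rw [← h]; simp
      rw [ih (pre ++ [p]) h2]
      simp

theorem pv_enum_inj (ec : List (Int × List Int)) (p q : Int × (Int × List Int))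
    (hp : p ∈ PySem.List.enumerate ec) (hq : q ∈ PySem.List.enumerate ec) (h1 : p.1 = q.1) :
    p = q := by
  rw [PySem.List.mem_enumerate_iff] at hp hq
  obtain ⟨k, hk, rfl⟩ := hp
  obtain ⟨k', hk', rfl⟩ := hq
  simp only at h1
  have : k = k' := by omega
  subst this; rfl

theorem pv_contains_kept (ec : List (Int × List Int)) (p : Int × (Int × List Int))
    (hp : p ∈ PySem.List.enumerate ec) :
    PySem.Set.contains
      (pvState ec (PySem.List.sorted (PySem.List.enumerate ec) (fun q => q.2.2.length) true)).2 p.1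
      = !pvSup ec p.2.2 := by
  have hpord : p ∈ PySem.List.sorted (PySem.List.enumerate ec) (fun q => q.2.2.length) true :=
    (PySem.List.mem_sorted ..).2 hp
  rw [Bool.eq_iff_iff]
  simp only [pvState, PySem.Set.contains_iff, PySem.Set.mem_ofList, List.mem_map, List.mem_filter,
    Bool.not_eq_eq_eq_not, Bool.not_true]
  constructor
  · rintro ⟨q, ⟨hqord, hq⟩, h1⟩
    have := pv_enum_inj ec q p ((PySem.List.mem_sorted ..).1 hqord) hp h1
    subst this; exact hq
  · intro hmax
    exact ⟨p, ⟨hpord, hmax⟩, rfl⟩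

theorem pv_final_fold (ec : List (Int × List Int)) (K : PySem.Set Int) :
    ∀ (l : List (Int × List Int)) (s : Int) (st : List (Int × List Int) × Int),
      (∀ p ∈ PySem.List.enumerate l s, PySem.Set.contains K p.1 = !pvSup ec p.2.2) →
      (PySem.List.enumerate l s).foldl
        (fun (r : List (Int × List Int) × Int) p =>
          if PySem.Set.contains K p.1 then (r.1 ++ [(r.2, p.2.2)], r.2 + 1) else r) st
      = l.foldl
        (fun (r : List (Int × List Int) × Int) kv =>
          if pvSup ec kv.2 = false then (r.1 ++ [(r.2, kv.2)], r.2 + 1) else r) st := by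
  intro l
  induction l with
  | nil => intro s st h; simp [PySem.List.enumerate_nil]
  | cons x xs ih =>
      intro s st h
      rw [PySem.List.enumerate_cons]
      simp only [List.foldl_cons]
      have hx : PySem.Set.contains K (s, x).1 = !pvSup ec (s, x).2.2 := by
        apply h; rw [PySem.List.enumerate_cons]; exact List.mem_cons_self ..
      simp only at hx
      rw [hx]
      have htail : ∀ p ∈ PySem.List.enumerate xs (s+1), PySem.Set.contains K p.1 = !pvSup ec p.2.2 := by
        intro p hp; apply h; rw [PySem.List.enumerate_cons]; exact List.mem_cons_of_mem _ hp
      cases hc : pvSup ec x.2 <;> simp only [Bool.not_true, Bool.not_false] <;>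
        exact ih (s+1) _ htail


theorem pv_foldl_flag {α : Type} (P : α → Bool) (l : List α) (b : Bool) :
    l.foldl (fun b x => if P x then true else b) b = (b || l.any P) := by
  induction l generalizing b with
  | nil => simp
  | cons x xs ih =>
      simp only [List.foldl_cons, List.any_cons, ih]
      cases h : P x <;> simp

theorem pv_getD_mem (ec : List (Int × List Int)) (h : (ec.map Prod.fst).Nodup)
    (kv : Int × List Int) (hm : kv ∈ ec) :
    (PySem.Dict.mk ec).getD kv.1 [] = kv.2 :=
  PySem.Dict.getD_of_mem_items _ (by simpa using hm) (by simpa using h) []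


-- ===== VERDICT (by name: the statement is the Claim_ definition above) =====
theorem maximalClique_spec : Claim_equal_maximalClique := by
  intro ec _hdom hpre
  unfold Spec_maximalClique
  show maximalClique ec = maximalClique_alt ec
  unfold maximalClique maximalClique_alt
  simp only []
  -- A side: canonical form
  have hA : ec.foldl
      (fun (st : List (Int × List Int) × Int) kv =>
        let isContained :=
          ec.foldl
            (fun b kv2 =>
              if PySem.Set.issubset (PySem.Set.ofList kv.2) (PySem.Set.ofList kv2.2)
                  && decide (kv.2.length < kv2.2.length) then true else b)
            false
        if isContained = false then
          (st.1 ++ [(st.2, (PySem.Dict.mk ec).getD kv.1 [])], st.2 + 1)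
        else st)
      ([], 1)
    = ec.foldl
      (fun (r : List (Int × List Int) × Int) kv =>
        if pvSup ec kv.2 = false then (r.1 ++ [(r.2, kv.2)], r.2 + 1) else r)
      ([], 1) := by
    apply PySem.List.foldl_congr_mem
    intro st kv hkv
    simp only []
    rw [pv_foldl_flag, Bool.false_or, pv_getD_mem ec hpre kv hkv]
    rfl
  rw [hA]
  -- B side
  have hB : (PySem.List.sorted (PySem.List.enumerate ec) (fun p => p.2.2.length) true).foldl
      (fun (st : List (Nat × PySem.Set Int) × PySem.Set Int) p =>
        let s := PySem.Set.ofList p.2.2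
        let n := p.2.2.length
        if st.1.any (fun q => decide (n < q.1) && PySem.Set.issubset s q.2) then st
        else (st.1 ++ [(n, s)], PySem.Set.add st.2 p.1))
      ([], PySem.Set.empty)
    = pvState ec (PySem.List.sorted (PySem.List.enumerate ec) (fun p => p.2.2.length) true) := by
    have := pv_loop_inv ec (PySem.List.sorted (PySem.List.enumerate ec) (fun p => p.2.2.length) true) [] (by simp)
    simpa [pvState] using this
  rw [hB]
  congr 1
  exact (pv_final_fold ec _ ec 0 ([], 1) (fun p hp => pv_contains_kept ec p hp)).symm
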